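-- pv_equiv track=rewrite | github.com/paiml/depyler | examples/hard_grid_traverse.py | traverse_column_major
-- ===== SOURCE A (Python) =====
-- def traverse_column_major(grid: list[int], rows: int, cols: int) -> int:
--     """Sum all elements in column-major order."""
--     total: int = 0
--     c: int = 0
--     while c < cols:
--         r: int = 0
--         while r < rows:
--             idx: int = r * cols + c
--             total = total + grid[idx]
--             r = r + 1
--         c = c + 1
--     return total
-- ===== SOURCE B (Python) =====
-- def traverse_column_major(grid: list[int], rows: int, cols: int) -> int:
--     """Sum all elements in column-major order."""
--     if rows <= 0 or cols <= 0:
--         return 0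
--     total = 0
--     for i in range(rows * cols):
--         total += grid[i]
--     return total
-- ===== Notes on version B (the rewrite author's own statement) =====
-- stated objective: simpler
-- what changed: Replaces the two nested while loops with the column-major index arithmetic idx = r*cols+c by one flat loop over range(rows*cols), using that addition is order-independent; a guard returns 0 when rows or cols is non-positive.
import Mathlib
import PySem

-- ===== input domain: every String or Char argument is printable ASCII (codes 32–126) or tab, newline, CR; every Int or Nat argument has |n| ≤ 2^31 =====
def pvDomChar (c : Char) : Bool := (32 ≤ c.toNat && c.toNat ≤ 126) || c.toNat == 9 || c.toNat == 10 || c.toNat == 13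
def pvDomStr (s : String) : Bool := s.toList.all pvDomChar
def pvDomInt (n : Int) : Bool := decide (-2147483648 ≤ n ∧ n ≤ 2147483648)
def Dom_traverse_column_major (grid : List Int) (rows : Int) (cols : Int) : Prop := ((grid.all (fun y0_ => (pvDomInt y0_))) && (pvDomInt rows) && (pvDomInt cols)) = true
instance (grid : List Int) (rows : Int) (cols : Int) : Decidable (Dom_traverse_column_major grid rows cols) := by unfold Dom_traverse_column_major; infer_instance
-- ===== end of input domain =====

-- One line: B replaces the nested column-major while loops by a single flat loop over
-- range(rows*cols) (sum order does not matter), guarded by rows ≤ 0 / cols ≤ 0 → 0; simpler.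

-- ===== PORT A =====
-- inner 'while r < rows' loop: fuel = remaining iterations, state (r, total);
-- grid[idx] is pyGet?; the .getD 0 is unreachable inside Pre_ (IndexError excluded there)
def pvInnerA (grid : List Int) (cols c : Int) : Nat → Int → Int → Int
  | 0, _, total => total
  | n+1, r, total => pvInnerA grid cols c n (r+1) (total + (PySem.List.pyGet? grid (r*cols+c)).getD 0)

-- outer 'while c < cols' loop: fuel = remaining iterations, state (c, total)
def pvOuterA (grid : List Int) (rows cols : Int) : Nat → Int → Int → Int
  | 0, _, total => total
  | n+1, c, total => pvOuterA grid rows cols n (c+1) (pvInnerA grid cols c rows.toNat 0 total)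

def traverse_column_major (grid : List Int) (rows : Int) (cols : Int) : Int :=
  pvOuterA grid rows cols cols.toNat 0 0

-- ===== PORT B =====
def traverse_column_major_alt (grid : List Int) (rows : Int) (cols : Int) : Int :=
  if rows ≤ 0 ∨ cols ≤ 0 then 0
  else (PySem.List.pyRange 0 (rows*cols) 1).foldl
         (fun total i => total + (PySem.List.pyGet? grid i).getD 0) 0

-- ===== PRECONDITION & SPEC =====
-- Pre_ excludes exactly the inputs where Python A raises IndexError:
-- rows > 0 and cols > 0 but the grid is shorter than rows*cols.
def Pre_traverse_column_major (grid : List Int) (rows : Int) (cols : Int) : Prop :=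
  rows ≤ 0 ∨ cols ≤ 0 ∨ rows * cols ≤ (grid.length : Int)
instance (grid : List Int) (rows : Int) (cols : Int) : Decidable (Pre_traverse_column_major grid rows cols) := by unfold Pre_traverse_column_major; infer_instance
def pvWitness_traverse_column_major : List Int × Int × Int := ([1, 2, 3, 4, 5, 6], 2, 3)

def Spec_traverse_column_major (grid : List Int) (rows : Int) (cols : Int) (out : Int) : Prop := out = traverse_column_major_alt grid rows cols
instance (grid : List Int) (rows : Int) (cols : Int) (out : Int) : Decidable (Spec_traverse_column_major grid rows cols out) := by unfold Spec_traverse_column_major; infer_instance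

-- ===== CLAIM (what is proved, stated in full; the proofs are below) =====
def Claim_equal_traverse_column_major : Prop := ∀ (grid : List Int) (rows : Int) (cols : Int), Dom_traverse_column_major grid rows cols → Pre_traverse_column_major grid rows cols → Spec_traverse_column_major grid rows cols (traverse_column_major grid rows cols)

-- ===== LEMMAS AND PROOFS =====

-- the inner loop adds the column entries r, r+1, … of column c
theorem pvInnerA_eq_sum (grid : List Int) (cols c : Int) :
    ∀ (n : Nat) (r total : Int), pvInnerA grid cols c n r total
      = total + ∑ j ∈ Finset.range n, (PySem.List.pyGet? grid ((r + j) * cols + c)).getD 0 := by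
  intro n
  induction n with
  | zero => intro r total; simp [pvInnerA]
  | succ m ih =>
      intro r total
      rw [pvInnerA, ih, Finset.sum_range_succ']
      push_cast
      ring_nf

-- the outer loop sums columns c, c+1, …
theorem pvOuterA_eq_sum (grid : List Int) (rows cols : Int) :
    ∀ (m : Nat) (c total : Int), pvOuterA grid rows cols m c total
      = total + ∑ j ∈ Finset.range m, ∑ i ∈ Finset.range rows.toNat,
          (PySem.List.pyGet? grid ((i : Int) * cols + (c + j))).getD 0 := by
  intro m
  induction m with
  | zero => intro c total; simp [pvOuterA]
  | succ k ih =>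
      intro c total
      rw [pvOuterA, ih, pvInnerA_eq_sum, Finset.sum_range_succ']
      push_cast
      ring_nf
      have hsw : ∑ x ∈ Finset.range rows.toNat, (PySem.List.pyGet? grid ((x:Int) * cols + c)).getD 0
               = ∑ x ∈ Finset.range rows.toNat, (PySem.List.pyGet? grid (cols * (x:Int) + c)).getD 0 :=
        Finset.sum_congr rfl fun x _ => by ring_nf
      rw [hsw]
      ring

-- splitting a range sum
theorem pv_sum_range_add (f : Nat → Int) (m : Nat) :
    ∀ n : Nat, ∑ k ∈ Finset.range (m + n), f k
      = (∑ k ∈ Finset.range m, f k) + ∑ k ∈ Finset.range n, f (m + k) := by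
  intro n
  induction n with
  | zero => simp
  | succ p ih => rw [← Nat.add_assoc, Finset.sum_range_succ, ih, Finset.sum_range_succ]; ring

-- the double column-major sum over a rows×cols grid is the flat sum over rows*cols indices
theorem pv_double_sum (g : Nat → Int) (C : Nat) :
    ∀ R : Nat, ∑ j ∈ Finset.range C, ∑ i ∈ Finset.range R, g (i * C + j)
      = ∑ k ∈ Finset.range (R * C), g k := by
  intro R
  induction R with
  | zero => simp
  | succ S ih =>
      calc ∑ j ∈ Finset.range C, ∑ i ∈ Finset.range (S+1), g (i * C + j)
          = ∑ j ∈ Finset.range C, ((∑ i ∈ Finset.range S, g (i * C + j)) + g (S * C + j)) := by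
            refine Finset.sum_congr rfl fun j _ => ?_
            rw [Finset.sum_range_succ]
        _ = (∑ j ∈ Finset.range C, ∑ i ∈ Finset.range S, g (i * C + j))
              + ∑ j ∈ Finset.range C, g (S * C + j) := Finset.sum_add_distrib
        _ = (∑ k ∈ Finset.range (S * C), g k) + ∑ j ∈ Finset.range C, g (S * C + j) := by rw [ih]
        _ = ∑ k ∈ Finset.range (S * C + C), g k := (pv_sum_range_add g (S * C) C).symm
        _ = ∑ k ∈ Finset.range ((S+1) * C), g k := by rw [Nat.succ_mul]

-- B's fold is the flat sum
theorem pv_foldl_add (g : Int → Int) :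
    ∀ (l : List Int) (init : Int),
      l.foldl (fun total i => total + g i) init = init + (l.map g).sum := by
  intro l
  induction l with
  | nil => intro init; simp
  | cons x xs ih => intro init; simp [List.foldl_cons, ih]; ring

-- list-range sum equals Finset-range sum
theorem pv_list_sum_range (f : Nat → Int) :
    ∀ n : Nat, ((List.range n).map f).sum = ∑ k ∈ Finset.range n, f k := by
  intro n
  induction n with
  | zero => simp
  | succ m ih => rw [List.range_succ, Finset.sum_range_succ]; simp [ih]

-- the two ports agree on ALL inputs (outside Pre_ both Pythons raise IndexError)
theorem pv_ports_agree (grid : List Int) (rows cols : Int) :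
    traverse_column_major grid rows cols = traverse_column_major_alt grid rows cols := by
  unfold traverse_column_major traverse_column_major_alt
  rw [pvOuterA_eq_sum]
  by_cases hr : rows ≤ 0
  · simp [hr, Int.toNat_of_nonpos hr]
  · by_cases hc : cols ≤ 0
    · simp [hc, Int.toNat_of_nonpos hc]
    · push Not at hr hc
      rw [if_neg (by omega)]
      have hR : ((rows.toNat : Int)) = rows := Int.toNat_of_nonneg (le_of_lt hr)
      have hC : ((cols.toNat : Int)) = cols := Int.toNat_of_nonneg (le_of_lt hc)
      set g' : Int → Int := fun x => (PySem.List.pyGet? grid x).getD 0 with hg'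
      have key : ∀ j ∈ Finset.range cols.toNat, ∀ i ∈ Finset.range rows.toNat,
          g' ((i : Int) * cols + ((0:Int) + (j : Int))) = (fun k : Nat => g' (k : Int)) (i * cols.toNat + j) := by
        intro j _ i _
        congr 1
        push_cast
        rw [hC]
        ring
      rw [Finset.sum_congr rfl fun j hj => Finset.sum_congr rfl fun i hi => key j hj i hi]
      rw [pv_double_sum (fun k : Nat => g' (k : Int)) cols.toNat rows.toNat]
      rw [pv_foldl_add g']
      rw [PySem.List.pyRange_one]
      have hmul : rows * cols = ((rows.toNat * cols.toNat : Nat) : Int) := by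
        push_cast
        rw [hR, hC]
      have hN : ((rows * cols - 0).toNat) = rows.toNat * cols.toNat := by
        rw [Int.sub_zero, hmul, Int.toNat_natCast]
      rw [hN, List.map_map]
      have : (g' ∘ fun k : Nat => (0:Int) + (k : Int)) = fun k : Nat => g' (k : Int) := by
        funext k; simp
      rw [this, pv_list_sum_range (fun k : Nat => g' (k : Int))]

-- ===== VERDICT (by name: the statement is the Claim_ definition above) =====
theorem traverse_column_major_spec : Claim_equal_traverse_column_major := by
  intro grid rows cols _ _
  unfold Spec_traverse_column_major
  exact pv_ports_agree grid rows cols
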